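-- pv_equiv track=rewrite | github.com/IvanWoo/advent-of-code-2025 | 08/main.py | find_in_groups
-- ===== SOURCE A (Python) =====
-- def find_in_groups(i: int, j: int, groups: list[set[int]]) -> tuple[int, int]:
--     ig, jg = -1, -1
--     for idx, g in enumerate(groups):
--         if i in g:
--             ig = idx
--         if j in g:
--             jg = idx
--     assert ig != -1 or jg != -1
--     return (ig, jg)
-- ===== SOURCE B (Python) =====
-- def find_in_groups(i: int, j: int, groups: list[set[int]]) -> tuple[int, int]:
--     def last_group_of(x: int) -> int:
--         for idx in range(len(groups) - 1, -1, -1):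
--             if x in groups[idx]:
--                 return idx
--         return -1
--
--     ig = last_group_of(i)
--     jg = last_group_of(j)
--     assert ig != -1 or jg != -1
--     return (ig, jg)
-- ===== Notes on version B (the rewrite author's own statement) =====
-- stated objective: alternative
-- what changed: Replaces the single forward full scan that keeps overwriting both indices with two independent reversed early-exit searches (last group index of i, then of j), each stopping at its first reverse match.
import Mathlib
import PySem

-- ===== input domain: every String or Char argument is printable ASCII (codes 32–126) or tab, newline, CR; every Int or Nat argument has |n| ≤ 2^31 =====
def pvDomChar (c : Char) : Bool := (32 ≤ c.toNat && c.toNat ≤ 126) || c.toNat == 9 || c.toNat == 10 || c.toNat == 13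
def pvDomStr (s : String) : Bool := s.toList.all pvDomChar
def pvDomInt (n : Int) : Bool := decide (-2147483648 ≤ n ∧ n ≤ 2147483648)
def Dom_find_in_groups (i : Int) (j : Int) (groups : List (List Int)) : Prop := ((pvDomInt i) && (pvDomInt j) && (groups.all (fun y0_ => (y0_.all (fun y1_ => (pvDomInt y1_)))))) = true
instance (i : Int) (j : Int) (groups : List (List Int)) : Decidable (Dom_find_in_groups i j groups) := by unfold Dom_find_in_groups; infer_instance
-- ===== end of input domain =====

-- B replaces A's single forward scan (overwriting both indices) by two independent
-- reversed early-exit searches for the last group containing i resp. j (objective: alternative).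

-- ===== PORT A =====
-- one forward pass over enumerate(groups), remembering the last index containing i / j
def find_in_groups (i : Int) (j : Int) (groups : List (List Int)) : Int × Int :=
  (PySem.List.enumerate groups 0).foldl
    (fun (s : Int × Int) (p : Int × List Int) =>
      let s1 : Int × Int := if i ∈ p.2 then (p.1, s.2) else s
      if j ∈ p.2 then (s1.1, p.1) else s1)
    (-1, -1)
  -- the 'assert ig != -1 or jg != -1' raises exactly outside Pre_find_in_groups

-- ===== PORT B =====
-- 'for idx in range(len(groups)-1, -1, -1): if x in groups[idx]: return idx' / 'return -1';
-- groups[idx] is always in range here, so pyGetD's default [] is never used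
def lastGroupOf (x : Int) (groups : List (List Int)) : Int :=
  match (PySem.List.pyRange ((groups.length : Int) - 1) (-1) (-1)).find?
      (fun idx => decide (x ∈ PySem.List.pyGetD groups idx ([] : List Int))) with
  | some idx => idx
  | none => -1

def find_in_groups_alt (i : Int) (j : Int) (groups : List (List Int)) : Int × Int :=
  (lastGroupOf i groups, lastGroupOf j groups)
  -- the assert raises exactly outside Pre_find_in_groups

-- ===== PRECONDITION & SPEC =====
-- Pre_ excludes exactly the inputs where neither i nor j occurs in any group:
-- there both Pythons raise AssertionError.
def Pre_find_in_groups (i : Int) (j : Int) (groups : List (List Int)) : Prop :=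
  ∃ g ∈ groups, i ∈ g ∨ j ∈ g
instance (i : Int) (j : Int) (groups : List (List Int)) : Decidable (Pre_find_in_groups i j groups) := by unfold Pre_find_in_groups; infer_instance

def pvWitness_find_in_groups : Int × Int × List (List Int) := (1, 5, [[1, 2], [3], [1]])

def Spec_find_in_groups (i : Int) (j : Int) (groups : List (List Int)) (out : Int × Int) : Prop := out = find_in_groups_alt i j groups
instance (i : Int) (j : Int) (groups : List (List Int)) (out : Int × Int) : Decidable (Spec_find_in_groups i j groups out) := by unfold Spec_find_in_groups; infer_instance

-- ===== CLAIM (what is proved, stated in full; the proofs are below) =====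
def Claim_equal_find_in_groups : Prop := ∀ (i : Int) (j : Int) (groups : List (List Int)), Dom_find_in_groups i j groups → Pre_find_in_groups i j groups → Spec_find_in_groups i j groups (find_in_groups i j groups)

-- ===== LEMMAS AND PROOFS =====

theorem list_find?_congr {α : Type} (l : List α) (p q : α → Bool)
    (h : ∀ a ∈ l, p a = q a) : l.find? p = l.find? q := by
  induction l with
  | nil => rfl
  | cons a t ih =>
    simp only [List.find?_cons]
    rw [h a (by simp)]
    cases q a
    · exact ih (fun b hb => h b (by simp [hb]))
    · rfl

theorem pyGetD_append_left (gs : List (List Int)) (g : List Int)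
    (a : Int) (h0 : 0 ≤ a) (hlt : a < (gs.length : Int)) :
    PySem.List.pyGetD (gs ++ [g]) a ([] : List Int)
      = PySem.List.pyGetD gs a ([] : List Int) := by
  rw [PySem.List.pyGetD_of_nonneg (h := h0), PySem.List.pyGetD_of_nonneg (h := h0)]
  have hna : a.toNat < gs.length := by omega
  rw [List.getD_eq_getElem _ _ (by simp; omega), List.getD_eq_getElem _ _ hna]
  exact List.getElem_append_left hna

theorem lastGroupOf_append (x : Int) (gs : List (List Int)) (g : List Int) :
    lastGroupOf x (gs ++ [g]) =
      if x ∈ g then (gs.length : Int) else lastGroupOf x gs := by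
  unfold lastGroupOf
  have hlen : ((gs ++ [g]).length : Int) - 1 = (gs.length : Int) := by
    simp
  rw [hlen]
  rw [PySem.List.pyRange_neg_one_cons (by omega : (-1 : Int) < (gs.length : Int))]
  rw [List.find?_cons]
  have hget : PySem.List.pyGetD (gs ++ [g]) (gs.length : Int) ([] : List Int) = g := by
    rw [PySem.List.pyGetD_of_nonneg (h := by omega)]
    rw [List.getD_eq_getElem _ _ (by simp)]
    simp
  rw [hget]
  have hcong :
      (PySem.List.pyRange ((gs.length : Int) - 1) (-1) (-1)).find?
          (fun idx => decide (x ∈ PySem.List.pyGetD (gs ++ [g]) idx ([] : List Int)))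
        = (PySem.List.pyRange ((gs.length : Int) - 1) (-1) (-1)).find?
          (fun idx => decide (x ∈ PySem.List.pyGetD gs idx ([] : List Int))) := by
    apply list_find?_congr
    intro a ha
    rw [PySem.List.mem_pyRange_neg_one] at ha
    rw [pyGetD_append_left gs g a (by omega) (by omega)]
  by_cases hx : x ∈ g
  · simp [hx]
  · rw [if_neg hx]
    simp only [hx, decide_false]
    rw [hcong]

theorem lastGroupOf_nil (x : Int) : lastGroupOf x [] = -1 := by
  unfold lastGroupOf
  rw [show ((([] : List (List Int)).length : Int) - 1) = (-1 : Int) by simp]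
  rw [PySem.List.pyRange_neg_one_eq_nil (le_refl _)]
  rfl

theorem find_in_groups_eq (i j : Int) (groups : List (List Int)) :
    find_in_groups i j groups = (lastGroupOf i groups, lastGroupOf j groups) := by
  induction groups using List.reverseRecOn with
  | nil => simp [find_in_groups, lastGroupOf_nil, PySem.List.enumerate_nil]
  | append_singleton gs g ih =>
    unfold find_in_groups at ih ⊢
    rw [PySem.List.enumerate_append, List.foldl_append, ih,
        lastGroupOf_append, lastGroupOf_append]
    simp only [PySem.List.enumerate_cons, PySem.List.enumerate_nil,
      List.foldl_cons, List.foldl_nil]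
    by_cases hi : i ∈ g <;> by_cases hj : j ∈ g <;> simp [hi, hj]

-- ===== VERDICT (by name: the statement is the Claim_ definition above) =====
theorem find_in_groups_spec : Claim_equal_find_in_groups := by
  intro i j groups _ _
  show _ = _
  rw [find_in_groups_eq]
  rfl
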